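-- pv_equiv track=rewrite | github.com/pavelvladimirovich258614-sys/TenChat_NeuroBooster_v1 | app/utils/cookies_parser.py | extract_auth_tokens
-- ===== SOURCE A (Python) =====
-- from typing import Dict, List, Any
--
-- def extract_auth_tokens(cookies_dict: Dict[str, str]) -> Dict[str, str]:
--     """
--     Extract authentication tokens from cookies
--
--     Args:
--         cookies_dict: Dictionary with cookies
--
--     Returns:
--         Dictionary with important auth tokens
--     """
--     auth_tokens = {}
--
--     # TenChat-specific cookies
--     tenchat_cookies = [
--         "SESSION",
--         "TCAF",
--         "TCRF",
--         "session",
--         "tcaf",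
--         "tcrf"
--     ]
--
--     # Common authentication cookie names
--     generic_cookies = [
--         "sessionid",
--         "csrftoken",
--         "X-Xsrf-Token",
--         "auth_token",
--         "access_token",
--         "refresh_token",
--         "_session",
--         "sid"
--     ]
--
--     important_cookies = tenchat_cookies + generic_cookies
--
--     for key in important_cookies:
--         if key in cookies_dict:
--             auth_tokens[key] = cookies_dict[key]
--
--     return auth_tokens
-- ===== SOURCE B (Python) =====
-- IMPORTANT = (
--     "SESSION", "TCAF", "TCRF", "session", "tcaf", "tcrf",
--     "sessionid", "csrftoken", "X-Xsrf-Token", "auth_token",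
--     "access_token", "refresh_token", "_session", "sid",
-- )
-- RANK = {name: pos for pos, name in enumerate(IMPORTANT)}
--
--
-- def extract_auth_tokens(cookies_dict):
--     """Extract authentication tokens from cookies (single pass over the input,
--     then ordered by the fixed importance rank)."""
--     found = [(k, v) for k, v in cookies_dict.items() if k in RANK]
--     found.sort(key=lambda kv: RANK[kv[0]])
--     return dict(found)
-- ===== Notes on version B (the rewrite author's own statement) =====
-- stated objective: alternative
-- what changed: B inverts the traversal: instead of looping over the fixed name list and probing the cookie dict, it makes one pass over cookies_dict.items() collecting keys present in a precomputed rank table, then sorts the matches by that rank to restore the fixed-list order.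
import Mathlib
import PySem

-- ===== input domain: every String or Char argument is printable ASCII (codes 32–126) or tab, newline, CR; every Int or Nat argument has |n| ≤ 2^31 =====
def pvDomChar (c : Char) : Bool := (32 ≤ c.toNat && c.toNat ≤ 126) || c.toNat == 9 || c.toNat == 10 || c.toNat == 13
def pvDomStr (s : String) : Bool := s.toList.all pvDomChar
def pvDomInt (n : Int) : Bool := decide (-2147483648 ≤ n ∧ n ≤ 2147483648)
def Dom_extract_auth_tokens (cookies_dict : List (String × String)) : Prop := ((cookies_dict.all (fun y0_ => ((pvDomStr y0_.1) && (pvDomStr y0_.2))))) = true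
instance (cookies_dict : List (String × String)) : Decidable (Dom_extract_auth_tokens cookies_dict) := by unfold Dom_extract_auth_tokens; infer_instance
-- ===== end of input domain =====

-- B inverts the traversal: one pass over the cookie items collecting keys present in a
-- precomputed rank table, then a stable sort by that rank; same key-value subset as A.
-- (Equivalence is about the RETURN value; neither version mutates its argument.)

-- ===== PORT A =====
-- tenchat_cookies ++ generic_cookies, in A's order
def pvImportantCookies : List String :=
  ["SESSION", "TCAF", "TCRF", "session", "tcaf", "tcrf",
   "sessionid", "csrftoken", "X-Xsrf-Token", "auth_token",
   "access_token", "refresh_token", "_session", "sid"]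

def extract_auth_tokens (cookies_dict : List (String × String)) : List (String × String) :=
  (pvImportantCookies.foldl
    (fun auth_tokens key =>
      -- `if key in cookies_dict: auth_tokens[key] = cookies_dict[key]`
      match (PySem.Dict.mk cookies_dict).get? key with
      | some v => auth_tokens.insert key v
      | none => auth_tokens)
    PySem.Dict.empty).items

-- ===== PORT B =====
-- RANK = {name: pos for pos, name in enumerate(IMPORTANT)}
def pvRank : PySem.Dict String Int :=
  PySem.Dict.ofList ((PySem.List.enumerate pvImportantCookies).map (fun p => (p.2, p.1)))

def extract_auth_tokens_alt (cookies_dict : List (String × String)) : List (String × String) :=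
  let found := cookies_dict.filter (fun kv => pvRank.contains kv.1)
  let sortedFound := PySem.List.sorted found (fun kv => pvRank.getD kv.1 0) false
  -- dict(found)
  (sortedFound.foldl (fun d kv => d.insert kv.1 kv.2) PySem.Dict.empty).items

-- ===== PRECONDITION & SPEC =====
-- Pre_ states the representation invariant of the Python argument (a dict): the association
-- list has pairwise-distinct keys. It excludes no input representable as a Python dict.
def Pre_extract_auth_tokens (cookies_dict : List (String × String)) : Prop :=
  (cookies_dict.map Prod.fst).Nodup
instance (cookies_dict : List (String × String)) : Decidable (Pre_extract_auth_tokens cookies_dict) := by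
  unfold Pre_extract_auth_tokens; infer_instance

def pvWitness_extract_auth_tokens : (List (String × String)) :=
  [("sid", "a"), ("other", "b"), ("SESSION", "c")]

def Spec_extract_auth_tokens (cookies_dict : List (String × String)) (out : List (String × String)) : Prop := out = extract_auth_tokens_alt cookies_dict
instance (cookies_dict : List (String × String)) (out : List (String × String)) : Decidable (Spec_extract_auth_tokens cookies_dict out) := by unfold Spec_extract_auth_tokens; infer_instance

-- ===== CLAIM (what is proved, stated in full; the proofs are below) =====
def Claim_equal_extract_auth_tokens : Prop := ∀ (cookies_dict : List (String × String)), Dom_extract_auth_tokens cookies_dict → Pre_extract_auth_tokens cookies_dict → Spec_extract_auth_tokens cookies_dict (extract_auth_tokens cookies_dict)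

-- ===== LEMMAS AND PROOFS =====

-- first match for key `k` in the cookie list, paired with the key (A's loop body yield)
def pvHit (cd : List (String × String)) (k : String) : Option (String × String) :=
  ((PySem.Dict.mk cd).get? k).map (fun v => (k, v))

theorem pvHit_eq_some {cd : List (String × String)} {k : String} {p : String × String} :
    pvHit cd k = some p ↔ k = p.1 ∧ (PySem.Dict.mk cd).get? k = some p.2 := by
  unfold pvHit
  cases h : (PySem.Dict.mk cd).get? k with
  | none => simp
  | some v =>
    simp only [Option.map_some, Option.some.injEq]
    constructor
    · rintro rfl; exact ⟨rfl, rfl⟩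
    · rintro ⟨h1, h2⟩
      cases p; cases h1; cases h2; rfl

-- A's loop over fresh distinct keys appends its hits
theorem pvFoldA (cd : List (String × String)) (ks : List String)
    (acc : PySem.Dict String String)
    (hnd : ks.Nodup) (hfresh : ∀ k ∈ ks, acc.contains k = false) :
    (ks.foldl
      (fun auth_tokens key =>
        match (PySem.Dict.mk cd).get? key with
        | some v => auth_tokens.insert key v
        | none => auth_tokens)
      acc).items = acc.items ++ ks.filterMap (pvHit cd) := by
  induction ks generalizing acc with
  | nil => simp
  | cons k ks ih =>
    have hndk : ks.Nodup := hnd.of_cons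
    have hk : acc.contains k = false := hfresh k (List.mem_cons_self)
    have hne : ∀ k' ∈ ks, k' ≠ k := by
      intro k' hk'
      exact fun h => (List.nodup_cons.mp hnd).1 (h ▸ hk')
    simp only [List.foldl_cons, List.filterMap_cons]
    cases h : (PySem.Dict.mk cd).get? k with
    | none =>
      simp only [pvHit, h, Option.map_none]
      exact ih acc hndk (fun k' hk' => hfresh k' (List.mem_cons_of_mem _ hk'))
    | some v =>
      have hfresh' : ∀ k' ∈ ks, (acc.insert k v).contains k' = false := by
        intro k' hk'
        rw [PySem.Dict.contains_insert]
        have : (k' == k) = false := by simp [hne k' hk']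
        simp [this, hfresh k' (List.mem_cons_of_mem _ hk')]
      rw [pvHit, h, Option.map_some]
      rw [ih (acc.insert k v) hndk hfresh']
      rw [PySem.Dict.items_insert_of_not_contains _ _ hk]
      simp

-- A computes the fixed-name-ordered list of hits
theorem pvA_char (cd : List (String × String)) :
    extract_auth_tokens cd = pvImportantCookies.filterMap (pvHit cd) := by
  unfold extract_auth_tokens
  rw [pvFoldA cd pvImportantCookies PySem.Dict.empty (by decide)
      (fun k _ => PySem.Dict.contains_empty k)]
  rfl

theorem pvKeys_filterMap_hit (cd : List (String × String)) (ks : List String) :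
    (ks.filterMap (pvHit cd)).map Prod.fst
      = ks.filter (fun k => ((PySem.Dict.mk cd).get? k).isSome) := by
  induction ks with
  | nil => rfl
  | cons k ks ih =>
    simp only [List.filterMap_cons, List.filter_cons]
    cases h : (PySem.Dict.mk cd).get? k with
    | none => simpa [pvHit, h] using ih
    | some v => simpa [pvHit, h] using ih

theorem pvMem_filterMap_hit {cd : List (String × String)} {ks : List String}
    {p : String × String} :
    p ∈ ks.filterMap (pvHit cd) ↔ p.1 ∈ ks ∧ (PySem.Dict.mk cd).get? p.1 = some p.2 := by
  rw [List.mem_filterMap]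
  constructor
  · rintro ⟨a, ha, hfa⟩
    obtain ⟨rfl, h2⟩ := pvHit_eq_some.mp hfa
    exact ⟨ha, h2⟩
  · rintro ⟨h1, h2⟩
    exact ⟨p.1, h1, pvHit_eq_some.mpr ⟨rfl, h2⟩⟩

theorem pvRank_keys : pvRank.keys = pvImportantCookies := by decide

theorem pvRank_pairwise :
    pvImportantCookies.Pairwise (fun a b => pvRank.getD a 0 < pvRank.getD b 0) := by decide

-- ===== VERDICT =====
theorem extract_auth_tokens_spec : Claim_equal_extract_auth_tokens := by
  intro cd _hdom hpre
  unfold Spec_extract_auth_tokens extract_auth_tokens_alt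
  set ys := pvImportantCookies.filterMap (pvHit cd) with hys
  have hkeys_mk : (PySem.Dict.mk cd).keys = cd.map Prod.fst := by simp
  have hnd_mk : (PySem.Dict.mk cd).keys.Nodup := by rw [hkeys_mk]; exact hpre
  have hmem_cd : ∀ p : String × String,
      (PySem.Dict.mk cd).get? p.1 = some p.2 ↔ p ∈ cd := by
    intro p
    rw [PySem.Dict.get?_eq_some_iff_mem_items _ _ _ hnd_mk]
  have hcontains : ∀ k : String, pvRank.contains k = true ↔ k ∈ pvImportantCookies := by
    intro k
    rw [PySem.Dict.contains_iff_mem_keys, pvRank_keys]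
  -- membership in B's filtered list = membership in A's hit list
  have hmem : ∀ p : String × String,
      p ∈ cd.filter (fun kv => pvRank.contains kv.1) ↔ p ∈ ys := by
    intro p
    rw [hys, pvMem_filterMap_hit, List.mem_filter, hcontains, hmem_cd, and_comm]
  -- both lists have no duplicates
  have hnd_cd : cd.Nodup := hpre.of_map
  have hnd_found : (cd.filter (fun kv => pvRank.contains kv.1)).Nodup := hnd_cd.filter _
  have hnd_ys_keys : (ys.map Prod.fst).Nodup := by
    rw [hys, pvKeys_filterMap_hit]
    exact (by decide : pvImportantCookies.Nodup).filter _
  have hnd_ys : ys.Nodup := hnd_ys_keys.of_map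
  have hperm : ys.Perm (cd.filter (fun kv => pvRank.contains kv.1)) :=
    (List.perm_ext_iff_of_nodup hnd_ys hnd_found).mpr (fun p => (hmem p).symm)
  -- ys is strictly increasing in rank
  have hpw : ys.Pairwise (fun p q : String × String =>
      pvRank.getD p.1 0 < pvRank.getD q.1 0) := by
    rw [hys]
    apply List.Pairwise.filterMap (pvHit cd)
    · intro a b hab x hx y hy
      obtain ⟨hxa, -⟩ := pvHit_eq_some.mp hx
      obtain ⟨hyb, -⟩ := pvHit_eq_some.mp hy
      rw [← hxa, ← hyb]
      exact hab
    · exact pvRank_pairwise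
  have hsorted :
      PySem.List.sorted (cd.filter (fun kv => pvRank.contains kv.1))
        (fun kv => pvRank.getD kv.1 0) false = ys :=
    PySem.List.sorted_eq_of_perm_of_pairwise_lt _ _ _ hperm hpw
  simp only [hsorted]
  -- dict(ys) over distinct fresh keys appends all of ys
  rw [pvA_char]
  have := PySem.Dict.items_foldl_insert_fresh (l := ys) (k := Prod.fst) (v := Prod.snd)
      (d := PySem.Dict.empty)
      (fun a _ => PySem.Dict.contains_empty a.1) hnd_ys_keys
  simpa using this.symm
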